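-- pv_equiv track=rewrite | github.com/pp221B050642/python2 | numpy/decoder.py | previuos_letter
-- ===== SOURCE A (Python) =====
-- def previuos_letter(s):
--     t = ''
--     for i in s:
--         if ord(i)>=97 and ord(i)<122:
--             i = chr(ord(i)-1)
--         elif ord(i) == 97:
--             i = 'z'
--         t += i
--     return t
-- ===== SOURCE B (Python) =====
-- def previuos_letter(s):
--     for c in range(97, 122):
--         s = s.replace(chr(c), chr(c - 1))
--     return s
-- ===== Notes on version B (the rewrite author's own statement) =====
-- stated objective: faster
-- what changed: Replaces A's single pass that rebuilds the string one character at a time with += (an if/elif whose elif branch is dead) by 25 staged whole-string str.replace passes, one per code point 97..121 in ascending order so no character is shifted twice.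
import Mathlib
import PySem

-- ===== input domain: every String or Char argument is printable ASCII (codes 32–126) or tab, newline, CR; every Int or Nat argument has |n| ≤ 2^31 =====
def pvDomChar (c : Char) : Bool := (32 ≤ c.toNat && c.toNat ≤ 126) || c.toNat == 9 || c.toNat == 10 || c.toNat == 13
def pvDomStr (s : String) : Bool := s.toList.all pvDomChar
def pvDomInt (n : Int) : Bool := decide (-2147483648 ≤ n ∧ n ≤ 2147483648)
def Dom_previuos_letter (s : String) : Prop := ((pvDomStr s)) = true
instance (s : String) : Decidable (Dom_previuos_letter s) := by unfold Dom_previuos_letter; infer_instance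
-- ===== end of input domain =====

set_option maxRecDepth 8192
set_option maxHeartbeats 1000000


-- B replaces A's per-character accumulating loop by 25 staged whole-string
-- replace passes (s.replace(chr(c), chr(c-1)) for c in 97..121, ascending so
-- no character is shifted twice); faster in a timing run (C-level passes vs
-- a Python per-character loop). Return value only.

-- ===== PORT A =====
def previuos_letter (s : String) : String :=
  String.mk (s.toList.foldl (fun t i =>
    let i := if 97 ≤ i.toNat ∧ i.toNat < 122 then Char.ofNat (i.toNat - 1)
             else if i.toNat = 97 then 'z' else i
    t ++ [i]) [])

-- ===== PORT B =====
-- for c in range(97, 122): s = s.replace(chr(c), chr(c - 1)); return s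
def previuos_letter_alt (s : String) : String :=
  (PySem.List.pyRange 97 122 1).foldl
    (fun t c => PySem.Str.replace t (String.mk [Char.ofNat c.toNat])
                                    (String.mk [Char.ofNat (c - 1).toNat])) s

-- ===== PRECONDITION & SPEC =====
def Spec_previuos_letter (s : String) (out : String) : Prop := out = previuos_letter_alt s
instance (s : String) (out : String) : Decidable (Spec_previuos_letter s out) := by unfold Spec_previuos_letter; infer_instance

-- ===== CLAIM (what is proved, stated in full; the proofs are below) =====
def Claim_equal_previuos_letter : Prop := ∀ (s : String), Dom_previuos_letter s → Spec_previuos_letter s (previuos_letter s)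

-- ===== LEMMAS AND PROOFS =====

lemma pv_toList_mk (l : List Char) : (String.mk l).toList = l := by
  exact Eq.symm (String.ofList_eq.mp rfl)

lemma pv_mk_toList (t : String) : String.mk t.toList = t :=
  String.toList_injective (pv_toList_mk _)

lemma pv_fold_map (g : Char → Char) :
    ∀ (l : List Char) (acc : List Char),
      l.foldl (fun t i => t ++ [g i]) acc = acc ++ l.map g := by
  intro l
  induction l with
  | nil => intro acc; simp
  | cons x xs ih => intro acc; simp [ih]

-- single-character replace is a pointwise map
lemma pv_go_single (x y : Char) : ∀ (fuel : Nat) (l acc : List Char), l.length ≤ fuel →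
    PySem.Chars.replace.go [x] [y] fuel l acc
      = acc.reverse ++ l.map (fun c => if c = x then y else c) := by
  intro fuel
  induction fuel with
  | zero =>
    intro l acc h
    have : l = [] := List.eq_nil_of_length_eq_zero (Nat.le_zero.mp h)
    subst this; simp [PySem.Chars.replace.go]
  | succ n ih =>
    intro l acc h
    cases l with
    | nil => simp [PySem.Chars.replace.go]
    | cons c t =>
      rw [PySem.Chars.replace.go]
      have ht : t.length ≤ n := by simpa using h
      by_cases hc : c = x
      · subst hc
        have hp : [c].isPrefixOf (c :: t) = true := by simp [List.isPrefixOf]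
        simp [hp, ih t _ ht]
      · have hp : [x].isPrefixOf (c :: t) = false := by
          simp [List.isPrefixOf]; exact fun h => absurd h.symm hc
        simp [hp, ih t _ ht, hc]

lemma pv_replace_single (x y : Char) (l : List Char) :
    PySem.Chars.replace l [x] [y] = l.map (fun c => if c = x then y else c) := by
  rw [PySem.Chars.replace]
  simp [pv_go_single x y l.length l [] le_rfl]

-- a fold of maps is the map of the folded per-character function
lemma pv_fold_map_comm (h : Nat → Char → Char) :
    ∀ (L : List Nat) (l : List Char),
      L.foldl (fun t n => t.map (h n)) l
        = l.map (fun c => L.foldl (fun c n => h n c) c) := by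
  intro L
  induction L with
  | nil => intro l; simp
  | cons x xs ih => intro l; simp [ih, Function.comp]

lemma pv_char_valid {n : Nat} (h : n < 55296) : (Char.ofNat n).toNat = n := by
  rw [Char.toNat_ofNat, if_pos]
  exact Or.inl h

lemma pv_char_eq_iff (c : Char) {n : Nat} (h : n < 55296) :
    c = Char.ofNat n ↔ c.toNat = n := by
  constructor
  · intro hc; rw [hc, pv_char_valid h]
  · intro hc; rw [← hc, Char.ofNat_toNat]

-- folding the per-character replaces over range' a k shifts exactly [a, a+k)
lemma pv_char_fold : ∀ (k a : Nat), 97 ≤ a → a + k ≤ 122 → ∀ (c : Char),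
    (List.range' a k).foldl
      (fun c n => if c = Char.ofNat n then Char.ofNat (n - 1) else c) c
    = if a ≤ c.toNat ∧ c.toNat < a + k then Char.ofNat (c.toNat - 1) else c := by
  intro k
  induction k with
  | zero => intro a _ _ c; simp
  | succ m ih =>
    intro a ha hk c
    rw [List.range'_succ, List.foldl_cons]
    by_cases hc : c = Char.ofNat a
    · have hcn : c.toNat = a := (pv_char_eq_iff c (by omega)).mp hc
      rw [if_pos hc, ih (a+1) (by omega) (by omega)]
      have h1 : (Char.ofNat (a-1)).toNat = a - 1 := pv_char_valid (by omega)
      rw [if_neg (by rw [h1]; omega), if_pos (by omega), hcn]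
    · have hcn : c.toNat ≠ a := fun h => hc ((pv_char_eq_iff c (by omega)).mpr h)
      rw [if_neg hc, ih (a+1) (by omega) (by omega)]
      by_cases hr : a + 1 ≤ c.toNat ∧ c.toNat < a + 1 + m
      · rw [if_pos hr, if_pos (by omega)]
      · rw [if_neg hr, if_neg (by omega)]

-- ===== VERDICT (by name: the statement is the Claim_ definition above) =====
theorem previuos_letter_spec : Claim_equal_previuos_letter := by
  intro s _
  unfold Spec_previuos_letter previuos_letter previuos_letter_alt
  have hrange : PySem.List.pyRange 97 122 1 = (List.range' 97 25).map (Int.ofNat ·) := by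
    decide
  rw [hrange, List.foldl_map]
  have hstep : ∀ (t : String) (n : Nat), n ∈ List.range' 97 25 →
      PySem.Str.replace t (String.mk [Char.ofNat (Int.ofNat n).toNat])
        (String.mk [Char.ofNat ((Int.ofNat n) - 1).toNat])
      = String.mk (t.toList.map
          (fun c => if c = Char.ofNat n then Char.ofNat (n - 1) else c)) := by
    intro t n hn
    have hn' : 97 ≤ n ∧ n < 122 := by
      rw [List.mem_range'_1] at hn; omega
    apply String.toList_injective
    rw [PySem.Str.toList_replace]
    have hsub : ((Int.ofNat n) - 1).toNat = n - 1 := by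
      show ((n : Int) - 1).toNat = n - 1; omega
    have hnn : (Int.ofNat n).toNat = n := rfl
    rw [pv_toList_mk, pv_toList_mk, hsub, hnn, pv_replace_single, pv_toList_mk]
  have hfold : ∀ (L : List Nat) (t : String), (∀ n ∈ L, n ∈ List.range' 97 25) →
      L.foldl (fun t n => PySem.Str.replace t (String.mk [Char.ofNat (Int.ofNat n).toNat])
        (String.mk [Char.ofNat ((Int.ofNat n) - 1).toNat])) t
      = String.mk (L.foldl
          (fun l n => l.map (fun c => if c = Char.ofNat n then Char.ofNat (n - 1) else c))
          t.toList) := by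
    intro L
    induction L with
    | nil => intro t _; exact (pv_mk_toList t).symm
    | cons x xs ih =>
      intro t hmem
      rw [List.foldl_cons, List.foldl_cons,
        hstep t x (hmem x (List.mem_cons_self)),
        ih _ (fun n hn => hmem n (List.mem_cons_of_mem _ hn)), pv_toList_mk]
  rw [hfold (List.range' 97 25) s (fun n hn => hn), pv_fold_map_comm,
    pv_fold_map (fun i => if 97 ≤ i.toNat ∧ i.toNat < 122 then Char.ofNat (i.toNat - 1)
      else if i.toNat = 97 then 'z' else i)]
  simp only [List.nil_append]
  refine congrArg String.mk (List.map_congr_left ?_)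
  intro c _
  rw [pv_char_fold 25 97 le_rfl (by omega) c]
  by_cases h : 97 ≤ c.toNat ∧ c.toNat < 122
  · rw [if_pos h, if_pos (by omega)]
  · rw [if_neg h, if_neg (by omega), if_neg (by omega)]
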